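-- pv_equiv track=rewrite | github.com/Danila996/thirdPoint | Flow4/PlacementCode/MultiAgentGridEnv.py | preprocess_overlap
-- ===== SOURCE A (Python) =====
-- from collections import deque
-- from typing import Dict, List, Tuple, Set
--
-- def preprocess_overlap(
--         reserved_overlap: Dict[str, Set[Tuple[int, int]]],
--         r_specs: Dict[str, int],
--         start_pos: Dict[str, Tuple[int, int]],
--         module_area
-- ) -> Dict[str, Set[Tuple[int, int]]]:
--     """
--     对每个 reagent r，若 overlap 点超过需求 k，
--     1) 修剪到最小矩形 remaining；
--     2) 从四个角落分别生成 k 点的候选；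
--     3) 测试剩余自由区是否连通，取第一个通过的方案。
--     """
--     new_overlap: Dict[str, Set[Tuple[int, int]]] = {}
--
--     for r in sorted(reserved_overlap):
--         pts = set(reserved_overlap[r])
--         k = r_specs.get(r, 0)
--         # 不超额，直接保留
--         if len(pts) <= k:
--             new_overlap[r] = pts
--             continue
--
--         remaining = set(pts)
--         xs = sorted({x for x, _ in remaining})
--         ys = sorted({y for _, y in remaining})
--
--         all_module_pts = module_area
--
--         # “行列升序扫描”：
--         best_sel = set()
--         for x in sorted(xs):
--             for y in sorted(ys):
--                 sel = best_sel.copy()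
--                 if (x, y) in remaining:
--                     sel.add((x, y))
--                     free = all_module_pts - sel
--                     if is_connected(list(free)):
--                         best_sel.add((x, y))
--                     else:
--                         break
--                     if len(best_sel) == k:
--                         break
--             if len(best_sel) == k:
--                 break
--         new_overlap[r] = best_sel
--
--     return new_overlap
--
-- def is_connected(cells: List[Tuple[int, int]]) -> bool:
--     """
--     判断给定的点集在 4-邻下是否连通。
--     cells: [(r,c), ...]
--     返回 True/False
--     """
--     if not cells:
--         return True
--     # 用集合加速查找
--     cell_set = set(cells)
--     # BFS 从第一个点开始
--     start = cells[0]
--     seen = {start}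
--     dq = deque([start])
--     while dq:
--         r, c = dq.popleft()
--         for dr, dc in ((1, 0), (-1, 0), (0, 1), (0, -1)):
--             nb = (r + dr, c + dc)
--             if nb in cell_set and nb not in seen:
--                 seen.add(nb)
--                 dq.append(nb)
--     return len(seen) == len(cell_set)
-- ===== SOURCE B (Python) =====
-- def preprocess_overlap(reserved_overlap, r_specs, start_pos, module_area):
--     return {r: _trim(set(reserved_overlap[r]), r_specs.get(r, 0), module_area)
--             for r in sorted(reserved_overlap)}
--
--
-- def _trim(pts, k, module_area):
--     """Greedily pick up to k points of pts (row by row, ascending) whose removal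
--     keeps the free part of module_area in one piece."""
--     if len(pts) <= k:
--         return pts
--     chosen = set()
--     for x in sorted({x for x, _ in pts}):
--         for y in sorted({y for xx, y in pts if xx == x}):
--             trial = chosen | {(x, y)}
--             if not _one_region(module_area - trial):
--                 break
--             chosen = trial
--             if len(chosen) == k:
--                 break
--         if len(chosen) == k:
--             break
--     return chosen
--
--
-- def _one_region(cells):
--     """Disjoint-set view: fold each cell into the partition, merging every
--     existing component it is 4-adjacent to; one region iff <= 1 component."""
--     comps = []
--     for cell in cells:
--         merged, rest = [cell], []
--         for comp in comps:
--             if any(abs(cell[0] - p[0]) + abs(cell[1] - p[1]) == 1 for p in comp):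
--                 merged.extend(comp)
--             else:
--                 rest.append(comp)
--         comps = rest + [merged]
--     return len(comps) <= 1
-- ===== Notes on version B (the rewrite author's own statement) =====
-- stated objective: alternative
-- what changed: The connectivity test of the free region is re-implemented as a disjoint-set partition (fold each cell in, merging every component it is 4-adjacent to; connected iff at most one component remains) instead of a BFS flood from a start cell, and the greedy scan iterates each row's own sorted y-values directly instead of testing every global y for membership.
import Mathlib
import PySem

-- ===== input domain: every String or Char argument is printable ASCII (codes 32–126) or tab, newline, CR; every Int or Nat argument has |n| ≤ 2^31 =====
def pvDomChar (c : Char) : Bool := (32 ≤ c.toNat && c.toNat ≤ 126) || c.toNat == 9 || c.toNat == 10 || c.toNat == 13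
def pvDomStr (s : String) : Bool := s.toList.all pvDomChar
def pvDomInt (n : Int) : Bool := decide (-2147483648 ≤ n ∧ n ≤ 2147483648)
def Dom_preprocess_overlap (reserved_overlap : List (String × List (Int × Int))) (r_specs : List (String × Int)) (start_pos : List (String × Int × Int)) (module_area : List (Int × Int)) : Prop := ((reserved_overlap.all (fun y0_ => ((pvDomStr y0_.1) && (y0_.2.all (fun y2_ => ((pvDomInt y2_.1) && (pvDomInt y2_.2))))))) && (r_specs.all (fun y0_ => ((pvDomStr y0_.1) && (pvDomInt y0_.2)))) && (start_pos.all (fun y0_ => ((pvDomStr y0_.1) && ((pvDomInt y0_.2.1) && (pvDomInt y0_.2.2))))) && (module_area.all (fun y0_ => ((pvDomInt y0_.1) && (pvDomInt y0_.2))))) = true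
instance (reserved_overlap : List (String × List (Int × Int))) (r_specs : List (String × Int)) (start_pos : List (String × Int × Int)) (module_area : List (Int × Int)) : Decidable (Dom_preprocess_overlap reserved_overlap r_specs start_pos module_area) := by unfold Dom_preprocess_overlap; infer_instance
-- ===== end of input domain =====

-- B replaces A's BFS connectivity test by a disjoint-set partition (merge components along
-- 4-adjacency) and scans each row's own sorted y-values instead of testing every global y
-- for membership; same greedy result, alternative structure (not claimed faster).

-- ===== PORT A =====
/-- BFS neighbour step: Python's `if nb in cell_set and nb not in seen: seen.add(nb); dq.append(nb)`. -/
def pvBfsStep (cellSet : List (Int × Int)) (st : List (Int × Int) × List (Int × Int)) (nb : Int × Int) : List (Int × Int) × List (Int × Int) :=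
  if nb ∈ cellSet ∧ ¬ nb ∈ st.1 then (st.1 ++ [nb], st.2 ++ [nb]) else st

/-- Python's `while dq:` BFS loop; the fuel argument only makes the loop total
(`2*|cell_set|+1` steps always suffice for the call below, proved in the lemmas). -/
def pvBfsLoop (cellSet : List (Int × Int)) : Nat → List (Int × Int) → List (Int × Int) → List (Int × Int)
  | 0, seen, _ => seen
  | fuel+1, seen, dq =>
    match dq with
    | [] => seen
    | (r, c) :: rest =>
      let st := pvBfsStep cellSet (pvBfsStep cellSet (pvBfsStep cellSet (pvBfsStep cellSet (seen, rest) (r+1, c)) (r-1, c)) (r, c+1)) (r, c-1)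
      pvBfsLoop cellSet fuel st.1 st.2

/-- Port of A's `is_connected`. -/
def pvIsConnected (cells : List (Int × Int)) : Bool :=
  match cells with
  | [] => true
  | start :: _ =>
    let cellSet := PySem.Set.ofList cells
    let seen := pvBfsLoop cellSet (2 * cellSet.length + 1) [start] [start]
    decide (seen.length = cellSet.length)

/-- A's inner `for y in sorted(ys):` loop (returns the updated `best_sel`). -/
def pvRowScanA (remaining moduleSet : PySem.Set (Int × Int)) (k : Int) (x : Int) (best : PySem.Set (Int × Int)) : List Int → PySem.Set (Int × Int)
  | [] => best
  | y :: ys =>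
    if (x, y) ∈ remaining then
      let sel := PySem.Set.add best (x, y)
      let free := PySem.Set.diff moduleSet sel
      if pvIsConnected free then
        if PySem.Set.len sel = k then sel else pvRowScanA remaining moduleSet k x sel ys
      else best
    else pvRowScanA remaining moduleSet k x best ys

/-- A's outer `for x in sorted(xs):` loop. -/
def pvColScanA (remaining moduleSet : PySem.Set (Int × Int)) (k : Int) (ys : List Int) (best : PySem.Set (Int × Int)) : List Int → PySem.Set (Int × Int)
  | [] => best
  | x :: xs =>
    let best' := pvRowScanA remaining moduleSet k x best (PySem.List.sorted ys (fun v => v) false)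
    if PySem.Set.len best' = k then best' else pvColScanA remaining moduleSet k ys best' xs

/-- A's `for r in sorted(reserved_overlap):` loop building `new_overlap`. -/
def pvMainA (d : PySem.Dict String (List (Int × Int))) (specs : PySem.Dict String Int) (module_area : List (Int × Int)) (acc : PySem.Dict String (List (Int × Int))) : List String → PySem.Dict String (List (Int × Int))
  | [] => acc
  | r :: keys =>
    let pts := PySem.Set.ofList (d.getD r [])
    let k := specs.getD r 0
    if PySem.Set.len pts ≤ k then pvMainA d specs module_area (acc.insert r pts) keys
    else
      let remaining := PySem.Set.ofList pts
      let xs := PySem.List.sorted (PySem.Set.ofList (remaining.map (fun p => p.1))) (fun v => v) false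
      let ys := PySem.List.sorted (PySem.Set.ofList (remaining.map (fun p => p.2))) (fun v => v) false
      let best := pvColScanA remaining (PySem.Set.ofList module_area) k ys PySem.Set.empty (PySem.List.sorted xs (fun v => v) false)
      pvMainA d specs module_area (acc.insert r best) keys

def preprocess_overlap (reserved_overlap : List (String × List (Int × Int))) (r_specs : List (String × Int)) (start_pos : List (String × Int × Int)) (module_area : List (Int × Int)) : List (String × List (Int × Int)) :=
  let d := PySem.Dict.ofList reserved_overlap
  (pvMainA d (PySem.Dict.ofList r_specs) module_area PySem.Dict.empty (PySem.List.sorted d.keys (fun s => s) false)).items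

-- ===== PORT B =====
/-- B's 4-adjacency test `abs(cell[0]-p[0]) + abs(cell[1]-p[1]) == 1`. -/
def pvAdjB (a p : Int × Int) : Bool := (a.1 - p.1).natAbs + (a.2 - p.2).natAbs == 1

/-- B's disjoint-set step: fold `cell` into the partition, merging every component
it is 4-adjacent to. -/
def pvMergeCell (comps : List (List (Int × Int))) (cell : Int × Int) : List (List (Int × Int)) :=
  let mr := comps.foldl
    (fun (mr : List (Int × Int) × List (List (Int × Int))) comp =>
      if comp.any (fun p => pvAdjB cell p) then (mr.1 ++ comp, mr.2) else (mr.1, mr.2 ++ [comp]))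
    ([cell], [])
  mr.2 ++ [mr.1]

/-- Port of B's `_one_region`. -/
def pvOneRegion (cells : List (Int × Int)) : Bool :=
  decide ((cells.foldl pvMergeCell []).length ≤ 1)

/-- B's inner loop over one row's own sorted y-values. -/
def pvRowScanB (moduleSet : PySem.Set (Int × Int)) (k : Int) (x : Int) (chosen : PySem.Set (Int × Int)) : List Int → PySem.Set (Int × Int)
  | [] => chosen
  | y :: ys =>
    let trial := PySem.Set.union chosen [(x, y)]
    if ¬ pvOneRegion (PySem.Set.diff moduleSet trial) then chosen
    else if PySem.Set.len trial = k then trial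
    else pvRowScanB moduleSet k x trial ys

/-- B's outer loop over the sorted distinct row coordinates. -/
def pvColScanB (pts moduleSet : PySem.Set (Int × Int)) (k : Int) (chosen : PySem.Set (Int × Int)) : List Int → PySem.Set (Int × Int)
  | [] => chosen
  | x :: xs =>
    let chosen' := pvRowScanB moduleSet k x chosen
      (PySem.List.sorted (PySem.Set.ofList ((pts.filter (fun p => p.1 == x)).map (fun p => p.2))) (fun v => v) false)
    if PySem.Set.len chosen' = k then chosen' else pvColScanB pts moduleSet k chosen' xs

/-- Port of B's `_trim`. -/
def pvTrimB (pts : PySem.Set (Int × Int)) (k : Int) (module_area : List (Int × Int)) : PySem.Set (Int × Int) :=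
  if PySem.Set.len pts ≤ k then pts
  else pvColScanB pts (PySem.Set.ofList module_area) k PySem.Set.empty
    (PySem.List.sorted (PySem.Set.ofList (pts.map (fun p => p.1))) (fun v => v) false)

def preprocess_overlap_alt (reserved_overlap : List (String × List (Int × Int))) (r_specs : List (String × Int)) (start_pos : List (String × Int × Int)) (module_area : List (Int × Int)) : List (String × List (Int × Int)) :=
  let d := PySem.Dict.ofList reserved_overlap
  let specs := PySem.Dict.ofList r_specs
  ((PySem.List.sorted d.keys (fun s => s) false).foldl
      (fun acc r => acc.insert r (pvTrimB (PySem.Set.ofList (d.getD r [])) (specs.getD r 0) module_area))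
      PySem.Dict.empty).items

-- ===== PRECONDITION & SPEC =====
def Spec_preprocess_overlap (reserved_overlap : List (String × List (Int × Int))) (r_specs : List (String × Int)) (start_pos : List (String × Int × Int)) (module_area : List (Int × Int)) (out : List (String × List (Int × Int))) : Prop := out = preprocess_overlap_alt reserved_overlap r_specs start_pos module_area
instance (reserved_overlap : List (String × List (Int × Int))) (r_specs : List (String × Int)) (start_pos : List (String × Int × Int)) (module_area : List (Int × Int)) (out : List (String × List (Int × Int))) : Decidable (Spec_preprocess_overlap reserved_overlap r_specs start_pos module_area out) := by unfold Spec_preprocess_overlap; infer_instance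

-- ===== CLAIM (what is proved, stated in full; the proofs are below) =====
def Claim_equal_preprocess_overlap : Prop := ∀ (reserved_overlap : List (String × List (Int × Int))) (r_specs : List (String × Int)) (start_pos : List (String × Int × Int)) (module_area : List (Int × Int)), Dom_preprocess_overlap reserved_overlap r_specs start_pos module_area → Spec_preprocess_overlap reserved_overlap r_specs start_pos module_area (preprocess_overlap reserved_overlap r_specs start_pos module_area)

-- ===== LEMMAS AND PROOFS =====

-- Both connectivity tests decide the same graph property: every cell reaches every
-- cell through 4-adjacent steps inside the cell list.

lemma pvAdjB_symm (a b : Int × Int) : pvAdjB a b = pvAdjB b a := by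
  unfold pvAdjB
  have h1 : (a.1 - b.1).natAbs = (b.1 - a.1).natAbs := by omega
  have h2 : (a.2 - b.2).natAbs = (b.2 - a.2).natAbs := by omega
  rw [h1, h2]

lemma pvAdjB_iff (u q : Int × Int) :
    pvAdjB u q = true ↔ (q = (u.1+1, u.2) ∨ q = (u.1-1, u.2) ∨ q = (u.1, u.2+1) ∨ q = (u.1, u.2-1)) := by
  obtain ⟨r, c⟩ := u; obtain ⟨a, b⟩ := q
  simp only [pvAdjB, beq_iff_eq, Prod.mk.injEq]
  omega

/-- Reachability through 4-adjacent steps whose targets stay inside `s`. -/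
def pvReach (s : List (Int × Int)) (a b : Int × Int) : Prop :=
  Relation.ReflTransGen (fun u v => v ∈ s ∧ pvAdjB u v = true) a b

/-- The property both connectivity tests decide. -/
def pvAllConn (s : List (Int × Int)) : Prop := ∀ a ∈ s, ∀ b ∈ s, pvReach s a b

lemma pvReach_mono {s t : List (Int × Int)} (h : ∀ x, x ∈ s → x ∈ t) {a b : Int × Int}
    (hr : pvReach s a b) : pvReach t a b := by
  induction hr with
  | refl => exact .refl
  | tail _ hst ih => exact .tail ih ⟨h _ hst.1, hst.2⟩

lemma pvReach_mem {s : List (Int × Int)} {a b : Int × Int} (ha : a ∈ s) (h : pvReach s a b) : b ∈ s := by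
  induction h with
  | refl => exact ha
  | tail _ hst _ => exact hst.1

lemma pvReach_symm {s : List (Int × Int)} {a b : Int × Int} (ha : a ∈ s) (h : pvReach s a b) :
    pvReach s b a := by
  induction h with
  | refl => exact .refl
  | tail h1 hst ih =>
      refine Relation.ReflTransGen.trans (Relation.ReflTransGen.single ⟨pvReach_mem ha h1, ?_⟩) ih
      rw [← pvAdjB_symm]; exact hst.2

/-- Anything reachable from a member of a 4-adjacency-closed list stays in it. -/
lemma pvReach_closed {cs out : List (Int × Int)} {start : Int × Int} (h0 : start ∈ out)
    (hcl : ∀ p ∈ out, ∀ q ∈ cs, pvAdjB p q = true → q ∈ out) {q : Int × Int}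
    (hr : pvReach cs start q) : q ∈ out := by
  induction hr with
  | refl => exact h0
  | tail _ hst ih => exact hcl _ ih _ hst.1 hst.2

lemma pvNodup_append_singleton {l : List (Int × Int)} {x : Int × Int} (h : l.Nodup) (hx : x ∉ l) :
    (l ++ [x]).Nodup := by
  rw [List.nodup_append]
  refine ⟨h, List.nodup_singleton x, ?_⟩
  intro a ha b hb
  simp only [List.mem_singleton] at hb
  subst hb
  exact fun hab => hx (hab ▸ ha)

lemma pvLenLe {l1 l2 : List (Int × Int)} (h : l1.Nodup) (hs : ∀ x ∈ l1, x ∈ l2) :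
    l1.length ≤ l2.length :=
  (List.subperm_of_subset h hs).length_le

-- ---- the BFS side ----

/-- Invariant of the intermediate neighbour-expansion state. -/
def pvStInv (cs : List (Int × Int)) (start : Int × Int) (st : List (Int × Int) × List (Int × Int)) : Prop :=
  st.1.Nodup ∧ (∀ x ∈ st.1, x ∈ cs) ∧ (∀ x ∈ st.2, x ∈ st.1) ∧ (∀ p ∈ st.1, pvReach cs start p)

lemma pvBfsStep_cases (cs : List (Int × Int)) (st : List (Int × Int) × List (Int × Int)) (nb : Int × Int) :
    (pvBfsStep cs st nb = st ∧ (nb ∈ cs → nb ∈ st.1)) ∨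
    (nb ∈ cs ∧ nb ∉ st.1 ∧ pvBfsStep cs st nb = (st.1 ++ [nb], st.2 ++ [nb])) := by
  unfold pvBfsStep; split
  · rename_i h; exact Or.inr ⟨h.1, h.2, rfl⟩
  · rename_i h
    refine Or.inl ⟨rfl, ?_⟩
    intro hcs
    by_contra hns
    exact h ⟨hcs, hns⟩

lemma pvExpand_fst_sub (cs : List (Int × Int)) :
    ∀ (nbs : List (Int × Int)) (st : List (Int × Int) × List (Int × Int)),
      ∀ x ∈ st.1, x ∈ (nbs.foldl (pvBfsStep cs) st).1 := by
  intro nbs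
  induction nbs with
  | nil => intro st x hx; exact hx
  | cons nb nbs ih =>
      intro st x hx
      simp only [List.foldl_cons]
      refine ih _ x ?_
      rcases pvBfsStep_cases cs st nb with ⟨he, _⟩ | ⟨_, _, he⟩ <;> rw [he] <;> simp [hx]

lemma pvExpand_snd_sub (cs : List (Int × Int)) :
    ∀ (nbs : List (Int × Int)) (st : List (Int × Int) × List (Int × Int)),
      ∀ x ∈ st.2, x ∈ (nbs.foldl (pvBfsStep cs) st).2 := by
  intro nbs
  induction nbs with
  | nil => intro st x hx; exact hx
  | cons nb nbs ih =>
      intro st x hx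
      simp only [List.foldl_cons]
      refine ih _ x ?_
      rcases pvBfsStep_cases cs st nb with ⟨he, _⟩ | ⟨_, _, he⟩ <;> rw [he] <;> simp [hx]

lemma pvExpand_mem (cs : List (Int × Int)) :
    ∀ (nbs : List (Int × Int)) (st : List (Int × Int) × List (Int × Int)),
      ∀ nb ∈ nbs, nb ∈ cs → nb ∈ (nbs.foldl (pvBfsStep cs) st).1 := by
  intro nbs
  induction nbs with
  | nil => intro st nb h; cases h
  | cons nb' nbs ih =>
      intro st nb h hcs
      simp only [List.foldl_cons]
      rcases List.mem_cons.mp h with rfl | h2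
      · refine pvExpand_fst_sub cs nbs _ nb ?_
        rcases pvBfsStep_cases cs st nb with ⟨he, hm⟩ | ⟨_, _, he⟩ <;> rw [he]
        · exact hm hcs
        · simp
      · exact ih _ nb h2 hcs

lemma pvExpand_fst_snd (cs : List (Int × Int)) :
    ∀ (nbs : List (Int × Int)) (st : List (Int × Int) × List (Int × Int)),
      ∀ x ∈ (nbs.foldl (pvBfsStep cs) st).1,
        x ∈ st.1 ∨ x ∈ (nbs.foldl (pvBfsStep cs) st).2 := by
  intro nbs
  induction nbs with
  | nil => intro st x hx; exact Or.inl hx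
  | cons nb nbs ih =>
      intro st x hx
      simp only [List.foldl_cons] at hx ⊢
      rcases pvBfsStep_cases cs st nb with ⟨he, _⟩ | ⟨_, _, he⟩
      · rw [he] at hx ⊢; exact ih st x hx
      · rw [he] at hx ⊢
        rcases ih _ x hx with h1 | h2
        · rcases List.mem_append.mp h1 with h1a | h1b
          · exact Or.inl h1a
          · refine Or.inr (pvExpand_snd_sub cs nbs _ x ?_)
            simp only [List.mem_singleton] at h1b
            simp [h1b]
        · exact Or.inr h2

lemma pvExpand_inv (cs : List (Int × Int)) (start : Int × Int) :
    ∀ (nbs : List (Int × Int)) (st : List (Int × Int) × List (Int × Int)),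
      pvStInv cs start st → (∀ nb ∈ nbs, nb ∈ cs → pvReach cs start nb) →
      pvStInv cs start (nbs.foldl (pvBfsStep cs) st) := by
  intro nbs
  induction nbs with
  | nil => intro st h _; exact h
  | cons nb nbs ih =>
      intro st h hr
      simp only [List.foldl_cons]
      refine ih _ ?_ (fun nb' h1 h2 => hr nb' (List.mem_cons_of_mem _ h1) h2)
      rcases pvBfsStep_cases cs st nb with ⟨he, _⟩ | ⟨hcs, hnm, he⟩
      · rw [he]; exact h
      · rw [he]
        obtain ⟨hnd, hsub, hqs, hreach⟩ := h
        refine ⟨pvNodup_append_singleton hnd hnm, ?_, ?_, ?_⟩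
        · intro x hx; rcases List.mem_append.mp hx with h1 | h1
          · exact hsub x h1
          · simp only [List.mem_singleton] at h1; subst h1; exact hcs
        · intro x hx; rcases List.mem_append.mp hx with h1 | h1
          · exact List.mem_append_left _ (hqs x h1)
          · exact List.mem_append_right _ h1
        · intro p hp; rcases List.mem_append.mp hp with h1 | h1
          · exact hreach p h1
          · have hpn : p = nb := by simpa using h1
            subst hpn
            exact hr p (by simp) hcs

lemma pvExpand_measure (cs : List (Int × Int)) :
    ∀ (nbs : List (Int × Int)) (st : List (Int × Int) × List (Int × Int)),
      st.1.Nodup → (∀ x ∈ st.1, x ∈ cs) →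
      2 * (cs.length - (nbs.foldl (pvBfsStep cs) st).1.length) + (nbs.foldl (pvBfsStep cs) st).2.length
        ≤ 2 * (cs.length - st.1.length) + st.2.length := by
  intro nbs
  induction nbs with
  | nil => intro st _ _; exact le_refl _
  | cons nb nbs ih =>
      intro st hnd hsub
      simp only [List.foldl_cons]
      rcases pvBfsStep_cases cs st nb with ⟨he, _⟩ | ⟨hcs, hnm, he⟩
      · rw [he]; exact ih st hnd hsub
      · rw [he]
        have hnd' : (st.1 ++ [nb]).Nodup := pvNodup_append_singleton hnd hnm
        have hsub' : ∀ x ∈ st.1 ++ [nb], x ∈ cs := by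
          intro x hx; rcases List.mem_append.mp hx with h1 | h1
          · exact hsub x h1
          · simp only [List.mem_singleton] at h1; subst h1; exact hcs
        have hlen : st.1.length + 1 ≤ cs.length := by
          have h2 := pvLenLe hnd' hsub'
          simpa using h2
        have h3 := ih (st.1 ++ [nb], st.2 ++ [nb]) hnd' hsub'
        refine le_trans h3 ?_
        have h4 : (st.1 ++ [nb], st.2 ++ [nb]).1.length = st.1.length + 1 := by simp
        have h5 : (st.1 ++ [nb], st.2 ++ [nb]).2.length = st.2.length + 1 := by simp
        rw [h4, h5]
        omega

/-- Invariant of the BFS loop. -/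
def pvBfsInv (cs : List (Int × Int)) (start : Int × Int) (seen dq : List (Int × Int)) : Prop :=
  seen.Nodup ∧ (∀ x ∈ seen, x ∈ cs) ∧ (∀ x ∈ dq, x ∈ seen) ∧
  (∀ p ∈ seen, p ∉ dq → ∀ q ∈ cs, pvAdjB p q = true → q ∈ seen) ∧
  (∀ p ∈ seen, pvReach cs start p)

lemma pvBfsLoop_spec (cs : List (Int × Int)) (start : Int × Int) :
    ∀ (fuel : Nat) (seen dq : List (Int × Int)),
      pvBfsInv cs start seen dq →
      2 * (cs.length - seen.length) + dq.length ≤ fuel →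
      (∀ x ∈ seen, x ∈ pvBfsLoop cs fuel seen dq) ∧
      (pvBfsLoop cs fuel seen dq).Nodup ∧
      (∀ x ∈ pvBfsLoop cs fuel seen dq, x ∈ cs) ∧
      (∀ p ∈ pvBfsLoop cs fuel seen dq, ∀ q ∈ cs, pvAdjB p q = true → q ∈ pvBfsLoop cs fuel seen dq) ∧
      (∀ p ∈ pvBfsLoop cs fuel seen dq, pvReach cs start p) := by
  intro fuel
  induction fuel with
  | zero =>
      intro seen dq hinv hm
      obtain ⟨h1, h2, _, h4, h5⟩ := hinv
      have hdq : dq = [] := by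
        cases dq with
        | nil => rfl
        | cons a l => simp at hm
      subst hdq
      simp only [pvBfsLoop]
      exact ⟨fun x hx => hx, h1, h2, fun p hp q hq ha => h4 p hp (by simp) q hq ha, h5⟩
  | succ fuel ih =>
      intro seen dq hinv hm
      obtain ⟨h1, h2, h3, h4, h5⟩ := hinv
      match dq with
      | [] =>
          simp only [pvBfsLoop]
          exact ⟨fun x hx => hx, h1, h2, fun p hp q hq ha => h4 p hp (by simp) q hq ha, h5⟩
      | (r, c) :: rest =>
          have hrc : (r, c) ∈ seen := h3 _ (by simp)
          have hreachrc : pvReach cs start (r, c) := h5 _ hrc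
          set nbs : List (Int × Int) := [(r+1, c), (r-1, c), (r, c+1), (r, c-1)] with hnbs
          have hst : pvBfsLoop cs (fuel+1) seen ((r, c) :: rest)
              = pvBfsLoop cs fuel (nbs.foldl (pvBfsStep cs) (seen, rest)).1 (nbs.foldl (pvBfsStep cs) (seen, rest)).2 := rfl
          set st := nbs.foldl (pvBfsStep cs) (seen, rest) with hstdef
          have hnbr : ∀ nb ∈ nbs, nb ∈ cs → pvReach cs start nb := by
            intro nb hnb hcs
            refine Relation.ReflTransGen.tail hreachrc ⟨hcs, ?_⟩
            rw [pvAdjB_iff]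
            simp only [hnbs, List.mem_cons, List.not_mem_nil, or_false] at hnb
            rcases hnb with rfl | rfl | rfl | rfl
            · exact Or.inl rfl
            · exact Or.inr (Or.inl rfl)
            · exact Or.inr (Or.inr (Or.inl rfl))
            · exact Or.inr (Or.inr (Or.inr rfl))
          have hst0 : pvStInv cs start (seen, rest) :=
            ⟨h1, h2, fun x hx => h3 x (List.mem_cons_of_mem _ hx), h5⟩
          have hstinv : pvStInv cs start st := pvExpand_inv cs start nbs _ hst0 hnbr
          have hseen_st : ∀ x ∈ seen, x ∈ st.1 := pvExpand_fst_sub cs nbs (seen, rest)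
          have hclosed_rc : ∀ q ∈ cs, pvAdjB (r, c) q = true → q ∈ st.1 := by
            intro q hq ha
            refine pvExpand_mem cs nbs (seen, rest) q ?_ hq
            rw [pvAdjB_iff] at ha
            simp only [hnbs, List.mem_cons, List.not_mem_nil, or_false]
            rcases ha with h | h | h | h <;> simp [h]
          have hinv' : pvBfsInv cs start st.1 st.2 := by
            obtain ⟨g1, g2, g3, g4⟩ := hstinv
            refine ⟨g1, g2, g3, ?_, g4⟩
            intro p hp hpd q hq ha
            rcases pvExpand_fst_snd cs nbs (seen, rest) p hp with hpseen | hpq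
            · by_cases hprc : p = (r, c)
              · subst hprc; exact hclosed_rc q hq ha
              · by_cases hprest : p ∈ rest
                · exact absurd (pvExpand_snd_sub cs nbs (seen, rest) p hprest) hpd
                · have hnotdq : p ∉ (r, c) :: rest := by
                    simp [hprc, hprest]
                  exact hseen_st q (h4 p hpseen hnotdq q hq ha)
            · exact absurd hpq hpd
          have hm' : 2 * (cs.length - st.1.length) + st.2.length ≤ fuel := by
            have hme := pvExpand_measure cs nbs (seen, rest) h1 h2
            rw [← hstdef] at hme
            have hme2 : 2 * (cs.length - st.1.length) + st.2.length
                ≤ 2 * (cs.length - seen.length) + rest.length := hme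
            simp only [List.length_cons] at hm
            omega
          have hout := ih st.1 st.2 hinv' hm'
          rw [hst]
          exact ⟨fun x hx => hout.1 x (hseen_st x hx), hout.2.1, hout.2.2.1, hout.2.2.2.1, hout.2.2.2.2⟩

lemma pvIsConnected_iff (cells : List (Int × Int)) (h : cells.Nodup) :
    pvIsConnected cells = true ↔ pvAllConn cells := by
  match cells with
  | [] =>
      simp [pvIsConnected, pvAllConn]
  | start :: rest =>
      have hofl : PySem.Set.ofList (start :: rest) = start :: rest :=
        PySem.Set.ofList_eq_self_of_nodup _ h
      have hstart : start ∈ start :: rest := by simp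
      have hinv : pvBfsInv (start :: rest) start [start] [start] := by
        refine ⟨List.nodup_singleton _, ?_, ?_, ?_, ?_⟩
        · intro x hx; simp only [List.mem_singleton] at hx; subst hx; exact hstart
        · intro x hx; exact hx
        · intro p hp hpd; simp only [List.mem_singleton] at hp; subst hp; simp at hpd
        · intro p hp; simp only [List.mem_singleton] at hp; subst hp
          exact Relation.ReflTransGen.refl
      have hmeas : 2 * ((start :: rest).length - ([start] : List (Int × Int)).length)
          + ([start] : List (Int × Int)).length ≤ 2 * (start :: rest).length + 1 := by
        simp only [List.length_cons, List.length_nil]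
        omega
      have hout := pvBfsLoop_spec (start :: rest) start (2 * (start :: rest).length + 1) [start] [start] hinv hmeas
      obtain ⟨o1, o2, o3, o4, o5⟩ := hout
      set out := pvBfsLoop (start :: rest) (2 * (start :: rest).length + 1) [start] [start] with hout_def
      have hconn : pvIsConnected (start :: rest) = decide (out.length = (start :: rest).length) := by
        simp only [pvIsConnected, hofl]
        rw [hout_def]
      rw [hconn]
      constructor
      · intro hd
        have hlen : out.length = (start :: rest).length := of_decide_eq_true hd
        have hcso : ∀ x ∈ start :: rest, x ∈ out := by
          have hsp := List.subperm_of_subset o2 (fun x hx => o3 x hx)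
          have hperm := hsp.perm_of_length_le (le_of_eq hlen.symm)
          intro x hx; exact hperm.mem_iff.mpr hx
        intro a ha b hb
        have hra : pvReach (start :: rest) start a := o5 a (hcso a ha)
        have hrb : pvReach (start :: rest) start b := o5 b (hcso b hb)
        exact Relation.ReflTransGen.trans (pvReach_symm hstart hra) hrb
      · intro hac
        have hsub : ∀ q ∈ start :: rest, q ∈ out :=
          fun q hq => pvReach_closed (o1 start (by simp)) o4 (hac start hstart q hq)
        have hle1 : out.length ≤ (start :: rest).length := pvLenLe o2 o3
        have hle2 : (start :: rest).length ≤ out.length := pvLenLe h hsub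
        exact decide_eq_true (Nat.le_antisymm hle1 hle2)

-- ---- the disjoint-set side ----

lemma pvMergeCell_eq (comps : List (List (Int × Int))) (cell : Int × Int) :
    pvMergeCell comps cell
      = comps.filter (fun c => !c.any (fun p => pvAdjB cell p))
        ++ [cell :: (comps.filter (fun c => c.any (fun p => pvAdjB cell p))).flatten] := by
  have haux : ∀ (l : List (List (Int × Int))) (m : List (Int × Int)) (r : List (List (Int × Int))),
      l.foldl (fun (mr : List (Int × Int) × List (List (Int × Int))) comp =>
          if comp.any (fun p => pvAdjB cell p) then (mr.1 ++ comp, mr.2) else (mr.1, mr.2 ++ [comp])) (m, r)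
        = (m ++ (l.filter (fun c => c.any (fun p => pvAdjB cell p))).flatten,
           r ++ l.filter (fun c => !c.any (fun p => pvAdjB cell p))) := by
    intro l
    induction l with
    | nil => intro m r; simp
    | cons c l ih =>
        intro m r
        simp only [List.foldl_cons]
        by_cases hc : c.any (fun p => pvAdjB cell p) = true
        · rw [if_pos hc, ih]
          simp [hc]
        · rw [if_neg hc, ih]
          simp only [Bool.not_eq_true] at hc
          simp [hc]
  unfold pvMergeCell
  rw [haux]
  simp

/-- Invariant: `comps` is the partition of the processed cells into 4-connected components. -/
def pvPartInv (pref : List (Int × Int)) (comps : List (List (Int × Int))) : Prop :=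
  comps.flatten.Perm pref ∧ (∀ c ∈ comps, c ≠ []) ∧
  (∀ c ∈ comps, ∀ p ∈ c, ∀ q ∈ c, pvReach pref p q) ∧
  (∀ c ∈ comps, ∀ p ∈ c, ∀ q ∈ pref, pvAdjB p q = true → q ∈ c)

lemma pvMergeCell_inv {pref : List (Int × Int)} {comps : List (List (Int × Int))}
    (h : pvPartInv pref comps) (cell : Int × Int) :
    pvPartInv (pref ++ [cell]) (pvMergeCell comps cell) := by
  obtain ⟨hperm, hne, hreach, hclosed⟩ := h
  have hmono : ∀ x, x ∈ pref → x ∈ pref ++ [cell] := fun x hx => List.mem_append_left _ hx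
  rw [pvMergeCell_eq]
  have hmem_pref : ∀ q ∈ pref, ∃ c ∈ comps, q ∈ c :=
    fun q hq => List.mem_flatten.mp (hperm.symm.subset hq)
  have hflat_sub : ∀ c ∈ comps, ∀ p ∈ c, p ∈ pref :=
    fun c hc p hp => hperm.subset (List.mem_flatten.mpr ⟨c, hc, hp⟩)
  have hmr : ∀ p ∈ (cell :: (comps.filter (fun c => c.any (fun p => pvAdjB cell p))).flatten),
      pvReach (pref ++ [cell]) p cell ∧ pvReach (pref ++ [cell]) cell p := by
    intro p hp
    rcases List.mem_cons.mp hp with rfl | hp2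
    · exact ⟨.refl, .refl⟩
    · obtain ⟨c, hcf, hpc⟩ := List.mem_flatten.mp hp2
      obtain ⟨hcc, hcadj⟩ := List.mem_filter.mp hcf
      obtain ⟨a, ha, hadj⟩ := List.any_eq_true.mp hcadj
      constructor
      · refine Relation.ReflTransGen.tail (pvReach_mono hmono (hreach c hcc p hpc a ha)) ⟨by simp, ?_⟩
        rw [pvAdjB_symm]; exact hadj
      · exact Relation.ReflTransGen.trans
          (Relation.ReflTransGen.single ⟨hmono a (hflat_sub c hcc a ha), hadj⟩)
          (pvReach_mono hmono (hreach c hcc a ha p hpc))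
  refine ⟨?_, ?_, ?_, ?_⟩
  · -- the new components still partition the processed cells
    have h2 : ((comps.filter (fun c => !c.any (fun p => pvAdjB cell p)))
          ++ [cell :: (comps.filter (fun c => c.any (fun p => pvAdjB cell p))).flatten]).flatten
        = (comps.filter (fun c => !c.any (fun p => pvAdjB cell p))).flatten
          ++ (cell :: (comps.filter (fun c => c.any (fun p => pvAdjB cell p))).flatten) := by
      simp
    rw [h2]
    refine List.Perm.trans List.perm_middle ?_
    have h4 : ((comps.filter (fun c => !c.any (fun p => pvAdjB cell p))).flatten
        ++ (comps.filter (fun c => c.any (fun p => pvAdjB cell p))).flatten).Perm pref := by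
      have h5 : (comps.filter (fun c => !c.any (fun p => pvAdjB cell p))
          ++ comps.filter (fun c => c.any (fun p => pvAdjB cell p))).Perm comps :=
        List.Perm.trans List.perm_append_comm (List.filter_append_perm _ comps)
      have h6 := h5.flatten
      rw [List.flatten_append] at h6
      exact h6.trans hperm
    refine List.Perm.trans (h4.cons cell) ?_
    exact (by simpa using (List.perm_middle (l₁ := pref) (l₂ := ([] : List (Int × Int))) (a := cell)).symm)
  · intro c hc
    rcases List.mem_append.mp hc with h1 | h1
    · exact hne c (List.mem_of_mem_filter h1)
    · have : c = cell :: (comps.filter (fun c => c.any (fun p => pvAdjB cell p))).flatten := by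
        simpa using h1
      subst this; simp
  · intro c hc p hp q hq
    rcases List.mem_append.mp hc with h1 | h1
    · exact pvReach_mono hmono (hreach c (List.mem_of_mem_filter h1) p hp q hq)
    · have hcm : c = cell :: (comps.filter (fun c => c.any (fun p => pvAdjB cell p))).flatten := by
        simpa using h1
      subst hcm
      exact Relation.ReflTransGen.trans (hmr p hp).1 (hmr q hq).2
  · intro c hc p hp q hq hadj
    rcases List.mem_append.mp hc with h1 | h1
    · obtain ⟨hcc, hcb⟩ := List.mem_filter.mp h1
      rcases List.mem_append.mp hq with hq1 | hq1
      · exact hclosed c hcc p hp q hq1 hadj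
      · have hq2 : q = cell := by simpa using hq1
        exfalso
        rw [hq2, pvAdjB_symm] at hadj
        have hcontra : c.any (fun p' => pvAdjB cell p') = true := List.any_eq_true.mpr ⟨p, hp, hadj⟩
        rw [hcontra] at hcb
        simp at hcb
    · have hcm : c = cell :: (comps.filter (fun c => c.any (fun p => pvAdjB cell p))).flatten := by
        simpa using h1
      subst hcm
      rcases List.mem_cons.mp hp with hpcell | hp2
      · rw [hpcell] at hadj
        rcases List.mem_append.mp hq with hq1 | hq1
        · obtain ⟨cq, hcq, hqcq⟩ := hmem_pref q hq1
          have hq3 : cq.any (fun p' => pvAdjB cell p') = true := List.any_eq_true.mpr ⟨q, hqcq, hadj⟩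
          exact List.mem_cons_of_mem _
            (List.mem_flatten.mpr ⟨cq, List.mem_filter.mpr ⟨hcq, hq3⟩, hqcq⟩)
        · have hqcell : q = cell := by simpa using hq1
          rw [hqcell]; simp
      · obtain ⟨cp, hcpf, hpcp⟩ := List.mem_flatten.mp hp2
        obtain ⟨hcpc, _⟩ := List.mem_filter.mp hcpf
        rcases List.mem_append.mp hq with hq1 | hq1
        · exact List.mem_cons_of_mem _
            (List.mem_flatten.mpr ⟨cp, hcpf, hclosed cp hcpc p hpcp q hq1 hadj⟩)
        · have hqcell : q = cell := by simpa using hq1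
          rw [hqcell]; simp

lemma pvFold_inv : ∀ (suf pref : List (Int × Int)) (comps : List (List (Int × Int))),
    pvPartInv pref comps →
    pvPartInv (pref ++ suf) (suf.foldl pvMergeCell comps) := by
  intro suf
  induction suf with
  | nil => intro pref comps h; simpa using h
  | cons cell suf ih =>
      intro pref comps h
      have h2 := pvMergeCell_inv h cell
      have h3 := ih (pref ++ [cell]) _ h2
      simpa using h3

/-- Anything reachable from a member of a closed component stays in it. -/
lemma pvReach_stay {cells c1 : List (Int × Int)}
    (hcl : ∀ p ∈ c1, ∀ q ∈ cells, pvAdjB p q = true → q ∈ c1)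
    {p z : Int × Int} (hp : p ∈ c1) (hz : pvReach cells p z) : z ∈ c1 := by
  induction hz with
  | refl => exact hp
  | tail _ hst ih => exact hcl _ ih _ hst.1 hst.2

lemma pvOneRegion_iff (cells : List (Int × Int)) (h : cells.Nodup) :
    pvOneRegion cells = true ↔ pvAllConn cells := by
  have hinv0 : pvPartInv [] [] := ⟨by simp, by simp, by simp, by simp⟩
  have hinv := pvFold_inv cells [] [] hinv0
  simp only [List.nil_append] at hinv
  unfold pvOneRegion
  rcases hcomps : cells.foldl pvMergeCell [] with _ | ⟨c1, _ | ⟨c2, restc⟩⟩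
  · rw [hcomps] at hinv
    obtain ⟨hperm, _, _, _⟩ := hinv
    simp only [List.flatten_nil] at hperm
    have hnil : cells = [] := hperm.symm.eq_nil
    subst hnil
    simp [pvAllConn]
  · rw [hcomps] at hinv
    obtain ⟨hperm, _, hreach, _⟩ := hinv
    simp only [List.flatten_cons, List.flatten_nil, List.append_nil] at hperm
    constructor
    · intro _ a ha b hb
      exact hreach c1 (by simp) a (hperm.symm.subset ha) b (hperm.symm.subset hb)
    · intro _
      exact decide_eq_true (by simp)
  · rw [hcomps] at hinv
    obtain ⟨hperm, hne, _, hclosed⟩ := hinv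
    have hp : ∃ p, p ∈ c1 := by
      cases c1 with
      | nil => exact absurd rfl (hne [] (by simp))
      | cons a l => exact ⟨a, by simp⟩
    have hq : ∃ q, q ∈ c2 := by
      cases c2 with
      | nil => exact absurd rfl (hne [] (by simp))
      | cons a l => exact ⟨a, by simp⟩
    obtain ⟨p, hpc1⟩ := hp
    obtain ⟨q, hqc2⟩ := hq
    have hpcells : p ∈ cells := hperm.subset (List.mem_flatten.mpr ⟨c1, by simp, hpc1⟩)
    have hqcells : q ∈ cells := hperm.subset (List.mem_flatten.mpr ⟨c2, by simp, hqc2⟩)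
    have hflatnd : ((c1 :: c2 :: restc).flatten).Nodup := hperm.symm.nodup h
    rw [List.flatten_cons, List.nodup_append] at hflatnd
    have hdisj : q ∉ c1 := by
      intro hq1
      exact hflatnd.2.2 q hq1 q (by rw [List.flatten_cons]; exact List.mem_append_left _ hqc2) rfl
    constructor
    · intro hd
      exfalso
      have hle := of_decide_eq_true hd
      simp only [List.length_cons] at hle
      omega
    · intro hac
      exfalso
      have hcl1 : ∀ p' ∈ c1, ∀ q' ∈ cells, pvAdjB p' q' = true → q' ∈ c1 :=
        fun p' hp' q' hq' ha => hclosed c1 (by simp) p' hp' q' hq' ha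
      exact hdisj (pvReach_stay hcl1 hpc1 (hac p hpcells q hqcells))

/-- The two connectivity tests agree on duplicate-free cell lists. -/
lemma pvConn_eq (cells : List (Int × Int)) (h : cells.Nodup) :
    pvIsConnected cells = pvOneRegion cells :=
  Bool.coe_iff_coe.mp ((pvIsConnected_iff cells h).trans (pvOneRegion_iff cells h).symm)

-- ---- the greedy scans ----

lemma pvRow_eq (remaining moduleSet : PySem.Set (Int × Int)) (hm : moduleSet.Nodup)
    (k : Int) (x : Int) :
    ∀ (ys : List Int) (best : PySem.Set (Int × Int)),
      pvRowScanA remaining moduleSet k x best ys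
        = pvRowScanB moduleSet k x best (ys.filter (fun y => decide ((x, y) ∈ remaining))) := by
  intro ys
  induction ys with
  | nil => intro best; rfl
  | cons y ys ih =>
      intro best
      by_cases hmem : (x, y) ∈ remaining
      · have hfil : (y :: ys).filter (fun y => decide ((x, y) ∈ remaining))
            = y :: ys.filter (fun y => decide ((x, y) ∈ remaining)) := by
          simp [hmem]
        rw [hfil]
        have htrial : PySem.Set.union best [(x, y)] = PySem.Set.add best (x, y) := rfl
        have hnd : (PySem.Set.diff moduleSet (PySem.Set.add best (x, y))).Nodup :=
          List.Nodup.filter _ hm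
        have hconn := pvConn_eq (PySem.Set.diff moduleSet (PySem.Set.add best (x, y))) hnd
        by_cases h1 : pvOneRegion (PySem.Set.diff moduleSet (PySem.Set.add best (x, y))) = true
        · by_cases h2 : PySem.Set.len (PySem.Set.add best (x, y)) = k
          · simp only [PySem.Set.len] at h2
            simp [pvRowScanA, pvRowScanB, hmem, htrial, hconn, h1, h2]
          · simp only [PySem.Set.len] at h2
            simp [pvRowScanA, pvRowScanB, hmem, htrial, hconn, h1, h2, ih]
        · simp [pvRowScanA, pvRowScanB, hmem, htrial, hconn, h1]
      · have hfil : (y :: ys).filter (fun y => decide ((x, y) ∈ remaining))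
            = ys.filter (fun y => decide ((x, y) ∈ remaining)) := by
          simp [hmem]
        rw [hfil]
        simp only [pvRowScanA, if_neg hmem]
        exact ih best

lemma pvRowList_eq (pts : List (Int × Int)) (x : Int) :
    PySem.List.sorted (PySem.Set.ofList ((pts.filter (fun p => p.1 == x)).map (fun p => p.2))) (fun v => v) false
      = (PySem.List.sorted (PySem.Set.ofList (pts.map (fun p => p.2))) (fun v => v) false).filter
          (fun y => decide ((x, y) ∈ pts)) := by
  have hpw : ((PySem.List.sorted (PySem.Set.ofList (pts.map (fun p => p.2))) (fun v => v) false).filter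
      (fun y => decide ((x, y) ∈ pts))).Pairwise (fun a b => a < b) :=
    List.Pairwise.filter _ (PySem.List.sorted_ofList_pairwise_lt (pts.map (fun p => p.2)))
  refine PySem.List.sorted_eq_of_perm_of_pairwise_lt _ _ _ ?_ hpw
  refine (List.perm_ext_iff_of_nodup (hpw.imp fun hab => ne_of_lt hab) (PySem.Set.nodup_ofList _)).mpr ?_
  intro y
  simp only [List.mem_filter, PySem.List.mem_sorted, PySem.Set.mem_ofList, List.mem_map,
    List.mem_filter, decide_eq_true_eq, beq_iff_eq]
  constructor
  · rintro ⟨_, hxy⟩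
    exact ⟨(x, y), ⟨hxy, rfl⟩, rfl⟩
  · rintro ⟨⟨p1, p2⟩, ⟨hp, hpx⟩, hpy⟩
    dsimp at hpx hpy
    subst hpx
    subst hpy
    exact ⟨⟨(p1, p2), hp, rfl⟩, hp⟩

lemma pvCol_eq (pts moduleSet : PySem.Set (Int × Int)) (hm : moduleSet.Nodup) (k : Int) :
    ∀ (xs : List Int) (chosen : PySem.Set (Int × Int)),
      pvColScanA pts moduleSet k
          (PySem.List.sorted (PySem.Set.ofList (pts.map (fun p => p.2))) (fun v => v) false) chosen xs
        = pvColScanB pts moduleSet k chosen xs := by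
  intro xs
  induction xs with
  | nil => intro chosen; rfl
  | cons x xs ih =>
      intro chosen
      simp only [pvColScanA, pvColScanB]
      rw [PySem.List.sorted_sorted, pvRow_eq pts moduleSet hm k x, ← pvRowList_eq]
      by_cases h1 : PySem.Set.len (pvRowScanB moduleSet k x chosen
          (PySem.List.sorted (PySem.Set.ofList ((pts.filter (fun p => p.1 == x)).map (fun p => p.2))) (fun v => v) false)) = k
      · rw [if_pos h1, if_pos h1]
      · rw [if_neg h1, if_neg h1, ih]

lemma pvTrimB_of_le {pts : PySem.Set (Int × Int)} {k : Int} (ma : List (Int × Int))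
    (h : PySem.Set.len pts ≤ k) : pvTrimB pts k ma = pts := by
  unfold pvTrimB
  rw [if_pos h]

lemma pvTrimB_of_gt {pts : PySem.Set (Int × Int)} {k : Int} (ma : List (Int × Int))
    (h : ¬ PySem.Set.len pts ≤ k) :
    pvTrimB pts k ma = pvColScanB pts (PySem.Set.ofList ma) k PySem.Set.empty
      (PySem.List.sorted (PySem.Set.ofList (pts.map (fun p => p.1))) (fun v => v) false) := by
  unfold pvTrimB
  rw [if_neg h]

lemma pvMain_eq (d : PySem.Dict String (List (Int × Int))) (specs : PySem.Dict String Int)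
    (module_area : List (Int × Int)) :
    ∀ (keys : List String) (acc : PySem.Dict String (List (Int × Int))),
      pvMainA d specs module_area acc keys
        = keys.foldl (fun acc r =>
            acc.insert r (pvTrimB (PySem.Set.ofList (d.getD r [])) (specs.getD r 0) module_area)) acc := by
  intro keys
  induction keys with
  | nil => intro acc; rfl
  | cons r keys ih =>
      intro acc
      have hnd : (PySem.Set.ofList (d.getD r [])).Nodup := PySem.Set.nodup_ofList _
      have hofl : PySem.Set.ofList (PySem.Set.ofList (d.getD r []))
          = PySem.Set.ofList (d.getD r []) := PySem.Set.ofList_eq_self_of_nodup _ hnd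
      simp only [pvMainA, List.foldl_cons]
      by_cases hk : PySem.Set.len (PySem.Set.ofList (d.getD r [])) ≤ specs.getD r 0
      · rw [if_pos hk, ih, pvTrimB_of_le _ hk]
      · rw [if_neg hk, ih, pvTrimB_of_gt _ hk]
        congr 2
        rw [hofl, PySem.List.sorted_sorted]
        exact pvCol_eq _ _ (PySem.Set.nodup_ofList _) _ _ _

-- ===== VERDICT (by name: the statement is the Claim_ definition above) =====
theorem preprocess_overlap_spec : Claim_equal_preprocess_overlap := by
  unfold Claim_equal_preprocess_overlap
  intro reserved_overlap r_specs start_pos module_area _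
  show preprocess_overlap reserved_overlap r_specs start_pos module_area
      = preprocess_overlap_alt reserved_overlap r_specs start_pos module_area
  show (pvMainA (PySem.Dict.ofList reserved_overlap) (PySem.Dict.ofList r_specs) module_area
        PySem.Dict.empty (PySem.List.sorted (PySem.Dict.ofList reserved_overlap).keys (fun s => s) false)).items
      = ((PySem.List.sorted (PySem.Dict.ofList reserved_overlap).keys (fun s => s) false).foldl
          (fun acc r => acc.insert r (pvTrimB (PySem.Set.ofList ((PySem.Dict.ofList reserved_overlap).getD r []))
            ((PySem.Dict.ofList r_specs).getD r 0) module_area)) PySem.Dict.empty).items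
  rw [pvMain_eq]
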